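-- pv_equiv track=rewrite | github.com/kenyonshutt/pn-generator | generate.py | _assemble_sub_pn
-- ===== SOURCE A (Python) =====
-- def assemble_pn(
--     format_str: str, prefix: str, base_seq: int, type_letter: str, sub_seq: int
-- ) -> str:
--     """
--     Walk format_str character by character, flushing typed-character runs.
--
--     P -> prefix string (run length ignored)
--     B -> base_seq zero-padded to run length
--     T -> type_letter (run length always 1)
--     S -> sub_seq zero-padded to run length
--     other -> emitted literally
--     """
--     TYPED = {"P", "B", "T", "S"}
--     result = []
--     current: str | None = None
--     run = 0
--
--     def flush(t, n):
--         if not t or not n: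
--             return
--         if t == "P":
--             result.append(prefix)
--         elif t == "B":
--             result.append(str(base_seq).zfill(n))
--         elif t == "T":
--             result.append(type_letter)
--         elif t == "S":
--             result.append(str(sub_seq).zfill(n))
--
--     for ch in format_str:
--         if ch in TYPED:
--             if ch == current:
--                 run += 1
--             else:
--                 flush(current, run)
--                 current, run = ch, 1
--         else:
--             flush(current, run)
--             current, run = None, 0
--             result.append(ch)
--
--     flush(current, run)
--     return "".join(result)
--
-- def _assemble_sub_pn(
--     setup: dict, base_pn_root: str, type_letter: str, sub_seq: int
-- ) -> str:
--     """
--     Build a sub PN by appending the T+S tail (and any literal separators between them)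
--     to the already-assembled base_pn_root.
--     """
--     fmt = setup.get("format", "")
--     prefix = setup.get("prefix", "")
--
--     last_b = max((i for i, ch in enumerate(fmt) if ch == "B"), default=-1)
--     if last_b == -1:
--         return assemble_pn(fmt, prefix, 0, type_letter, sub_seq)
--
--     tail = fmt[last_b + 1 :]
--     TYPED = {"T", "S"}
--     result = [base_pn_root]
--     current: str | None = None
--     run = 0
--
--     def flush_tail(t, n):
--         if not t or not n:
--             return
--         if t == "T":
--             result.append(type_letter)
--         elif t == "S":
--             result.append(str(sub_seq).zfill(n))
--
--     for ch in tail: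
--         if ch in TYPED:
--             if ch == current:
--                 run += 1
--             else:
--                 flush_tail(current, run)
--                 current, run = ch, 1
--         else:
--             flush_tail(current, run)
--             current, run = None, 0
--             result.append(ch)
--
--     flush_tail(current, run)
--     return "".join(result)
-- ===== SOURCE B (Python) =====
-- import re
--
--
-- def _assemble_sub_pn(setup, base_pn_root, type_letter, sub_seq):
--     fmt = setup.get("format", "")
--     last_b = fmt.rfind("B")
--     if last_b == -1:
--         prefix = setup.get("prefix", "")
--         def repl(m):
--             run = m.group()
--             if run[0] == "P":
--                 return prefix
--             if run[0] == "B":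
--                 return str(0).zfill(len(run))
--             if run[0] == "T":
--                 return type_letter
--             return str(sub_seq).zfill(len(run))
--         return re.sub(r"P+|B+|T+|S+", repl, fmt)
--
--     def repl_tail(m):
--         run = m.group()
--         if run[0] == "T":
--             return type_letter
--         return str(sub_seq).zfill(len(run))
--     return base_pn_root + re.sub(r"T+|S+", repl_tail, fmt[last_b + 1:])
-- ===== Notes on version B (the rewrite author's own statement) =====
-- stated objective: idiomatic
-- what changed: Replaces A's two inlined character-by-character state machines (current/run accumulators with flush-at-transition, plus a max-over-enumerate scan for the last 'B') with str.rfind for the last 'B' and a single regex substitution per branch: re.sub(r'T+|S+', repl, tail) (resp. re.sub(r'P+|B+|T+|S+', repl, fmt)) whose repl closure maps each maximal typed run to its expansion, leaving all other characters untouched.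
import Mathlib
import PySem

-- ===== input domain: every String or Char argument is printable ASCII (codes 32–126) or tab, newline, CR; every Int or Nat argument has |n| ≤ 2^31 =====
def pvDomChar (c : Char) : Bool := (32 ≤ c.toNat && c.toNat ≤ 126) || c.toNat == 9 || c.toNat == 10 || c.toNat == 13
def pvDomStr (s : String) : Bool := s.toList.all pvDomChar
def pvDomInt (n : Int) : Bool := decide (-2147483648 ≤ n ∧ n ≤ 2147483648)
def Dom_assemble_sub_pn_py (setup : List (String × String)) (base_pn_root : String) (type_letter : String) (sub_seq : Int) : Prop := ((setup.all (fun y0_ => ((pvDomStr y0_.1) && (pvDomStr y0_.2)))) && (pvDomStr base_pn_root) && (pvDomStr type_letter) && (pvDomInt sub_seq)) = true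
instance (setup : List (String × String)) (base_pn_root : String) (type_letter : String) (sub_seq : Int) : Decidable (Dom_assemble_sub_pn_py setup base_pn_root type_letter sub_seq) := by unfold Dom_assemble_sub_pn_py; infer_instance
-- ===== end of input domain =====

-- ===== PORT A =====
-- B replaces A's two hand-rolled current/run/flush state machines by one regex
-- substitution (re.sub over maximal typed runs) per branch; objective: idiomatic, no speed claim.

-- Python helper assemble_pn's nested `flush` (returns the strings it would append)
def pvFlushA (pfx : String) (base_seq : Int) (type_letter : String) (sub_seq : Int) : Option Char → Nat → List String
  | none, _ => []
  | some c, n =>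
    if n = 0 then [] else
    if c = 'P' then [pfx]
    else if c = 'B' then [PySem.Str.zfill (PySem.Int.toStr base_seq) (n : Int)]
    else if c = 'T' then [type_letter]
    else if c = 'S' then [PySem.Str.zfill (PySem.Int.toStr sub_seq) (n : Int)]
    else []

-- Python helper assemble_pn: char-by-char state machine (result, current, run)
def assemble_pn_port (format_str pfx : String) (base_seq : Int) (type_letter : String) (sub_seq : Int) : String :=
  let st := format_str.toList.foldl
    (fun (st : List String × Option Char × Nat) ch =>
      if ch == 'P' || ch == 'B' || ch == 'T' || ch == 'S' then
        if some ch == st.2.1 then (st.1, st.2.1, st.2.2 + 1)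
        else (st.1 ++ pvFlushA pfx base_seq type_letter sub_seq st.2.1 st.2.2, some ch, 1)
      else (st.1 ++ pvFlushA pfx base_seq type_letter sub_seq st.2.1 st.2.2 ++ [String.ofList [ch]], none, 0))
    ([], none, 0)
  PySem.Str.join "" (st.1 ++ pvFlushA pfx base_seq type_letter sub_seq st.2.1 st.2.2)

-- the nested `flush_tail` of _assemble_sub_pn
def pvFlushTail (type_letter : String) (sub_seq : Int) : Option Char → Nat → List String
  | none, _ => []
  | some c, n =>
    if n = 0 then [] else
    if c = 'T' then [type_letter]
    else if c = 'S' then [PySem.Str.zfill (PySem.Int.toStr sub_seq) (n : Int)]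
    else []

def assemble_sub_pn_py (setup : List (String × String)) (base_pn_root : String) (type_letter : String) (sub_seq : Int) : String :=
  let d := PySem.Dict.mk setup
  let fmt := PySem.Dict.getD d "format" ""
  let pfx := PySem.Dict.getD d "prefix" ""
  -- last_b = max((i for i, ch in enumerate(fmt) if ch == "B"), default=-1)
  let last_b : Int :=
    (PySem.List.max?
      (((PySem.List.enumerate fmt.toList 0).filter (fun p => p.2 == 'B')).map (fun p => p.1))
      (fun y => y)).getD (-1)
  if last_b = -1 then assemble_pn_port fmt pfx 0 type_letter sub_seq
  else
    let tail := PySem.List.slice fmt.toList (some (last_b + 1)) none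
    let st := tail.foldl
      (fun (st : List String × Option Char × Nat) ch =>
        if ch == 'T' || ch == 'S' then
          if some ch == st.2.1 then (st.1, st.2.1, st.2.2 + 1)
          else (st.1 ++ pvFlushTail type_letter sub_seq st.2.1 st.2.2, some ch, 1)
        else (st.1 ++ pvFlushTail type_letter sub_seq st.2.1 st.2.2 ++ [String.ofList [ch]], none, 0))
      ([base_pn_root], none, 0)
    PySem.Str.join "" (st.1 ++ pvFlushTail type_letter sub_seq st.2.1 st.2.2)

-- ===== PORT B =====
-- Source B uses re.sub with the patterns r"P+|B+|T+|S+" and r"T+|S+". There is no regex engine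
-- in Lean, so re.sub is ported BY HAND for exactly these patterns; this is exact because each
-- alternative is a greedy '+' of a single distinct character, so the leftmost match of the
-- pattern at a position is precisely the maximal run of that character there, and re.sub
-- copies non-matching characters verbatim. The Python repl closure receives the matched
-- string, which here is determined by (first char, length), so it is ported as Char → Nat → String.

-- length of the leading run of c in the rest of the string (the rest of the regex match)
def pvRunLen (c : Char) : List Char → Nat
  | [] => 0
  | d :: ds => if d == c then pvRunLen c ds + 1 else 0

-- re.sub(<cls>+ alternation, repl, s): scan; on a class char replace its maximal run, else copy
def pvReSub (cls : Char → Bool) (repl : Char → Nat → String) : List Char → String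
  | [] => ""
  | c :: cs =>
    if cls c then repl c (pvRunLen c cs + 1) ++ pvReSub cls repl (cs.drop (pvRunLen c cs))
    else String.ofList [c] ++ pvReSub cls repl cs
termination_by cs => cs.length
decreasing_by
  all_goals simp only [List.length_drop, List.length_cons]
  all_goals omega

-- Source B's `repl` (first branch; prefix, base 0)
def pvReplFull (pfx type_letter : String) (sub_seq : Int) (c : Char) (n : Nat) : String :=
  if c = 'P' then pfx
  else if c = 'B' then PySem.Str.zfill (PySem.Int.toStr 0) (n : Int)
  else if c = 'T' then type_letter
  else PySem.Str.zfill (PySem.Int.toStr sub_seq) (n : Int)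

-- Source B's `repl_tail`
def pvReplTail (type_letter : String) (sub_seq : Int) (c : Char) (n : Nat) : String :=
  if c = 'T' then type_letter
  else PySem.Str.zfill (PySem.Int.toStr sub_seq) (n : Int)

def assemble_sub_pn_py_alt (setup : List (String × String)) (base_pn_root : String) (type_letter : String) (sub_seq : Int) : String :=
  let d := PySem.Dict.mk setup
  let fmt := PySem.Dict.getD d "format" ""
  let last_b := PySem.Str.rfind fmt "B"
  if last_b = -1 then
    pvReSub (fun c => c == 'P' || c == 'B' || c == 'T' || c == 'S')
      (pvReplFull (PySem.Dict.getD d "prefix" "") type_letter sub_seq) fmt.toList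
  else
    base_pn_root ++
      pvReSub (fun c => c == 'T' || c == 'S') (pvReplTail type_letter sub_seq)
        (PySem.List.slice fmt.toList (some (last_b + 1)) none)

-- ===== PRECONDITION & SPEC =====
def Spec_assemble_sub_pn_py (setup : List (String × String)) (base_pn_root : String) (type_letter : String) (sub_seq : Int) (out : String) : Prop := out = assemble_sub_pn_py_alt setup base_pn_root type_letter sub_seq
instance (setup : List (String × String)) (base_pn_root : String) (type_letter : String) (sub_seq : Int) (out : String) : Decidable (Spec_assemble_sub_pn_py setup base_pn_root type_letter sub_seq out) := by unfold Spec_assemble_sub_pn_py; infer_instance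

-- ===== CLAIM (what is proved, stated in full; the proofs are below) =====
def Claim_equal_assemble_sub_pn_py : Prop := ∀ (setup : List (String × String)) (base_pn_root : String) (type_letter : String) (sub_seq : Int), Dom_assemble_sub_pn_py setup base_pn_root type_letter sub_seq → Spec_assemble_sub_pn_py setup base_pn_root type_letter sub_seq (assemble_sub_pn_py setup base_pn_root type_letter sub_seq)

-- ===== LEMMAS AND PROOFS =====

-- handler view of a (class, repl) pair, used only by the proofs
def pvHdl (cls : Char → Bool) (repl : Char → Nat → String) (c : Char) : Option (Nat → String) :=
  if cls c then some (repl c) else none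

-- list-of-pieces form of pvReSub
def pvExpandL (h : Char → Option (Nat → String)) : List Char → List String
  | [] => []
  | c :: cs =>
    match h c with
    | none => String.ofList [c] :: pvExpandL h cs
    | some f => f (pvRunLen c cs + 1) :: pvExpandL h (cs.drop (pvRunLen c cs))
termination_by cs => cs.length
decreasing_by
  all_goals simp only [List.length_drop, List.length_cons]
  all_goals omega

-- generic flush: what the state machine emits for a pending run, handler h
def pvFlushG (h : Char → Option (Nat → String)) : Option Char → Nat → List String
  | none, _ => []
  | some c, n => if n = 0 then [] else match h c with | some f => [f n] | none => []

-- generic state machine, returning the list of strings emitted from state (cur, run)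
def pvMach (h : Char → Option (Nat → String)) : List Char → Option Char → Nat → List String
  | [], cur, run => pvFlushG h cur run
  | c :: cs, cur, run =>
    if (h c).isSome then
      if some c == cur then pvMach h cs cur (run + 1)
      else pvFlushG h cur run ++ pvMach h cs (some c) 1
    else pvFlushG h cur run ++ [String.ofList [c]] ++ pvMach h cs none 0

theorem pvFold_eq_mach (h : Char → Option (Nat → String))
    (flush : Option Char → Nat → List String) (hf : flush = pvFlushG h)
    (typed : Char → Bool) (ht : ∀ c, typed c = (h c).isSome)
    (cs : List Char) (res : List String) (cur : Option Char) (run : Nat) :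
    (let st := cs.foldl
        (fun (st : List String × Option Char × Nat) ch =>
          if typed ch then
            if some ch == st.2.1 then (st.1, st.2.1, st.2.2 + 1)
            else (st.1 ++ flush st.2.1 st.2.2, some ch, 1)
          else (st.1 ++ flush st.2.1 st.2.2 ++ [String.ofList [ch]], none, 0)) (res, cur, run)
     st.1 ++ flush st.2.1 st.2.2) = res ++ pvMach h cs cur run := by
  subst hf
  induction cs generalizing res cur run with
  | nil => simp [pvMach]
  | cons c cs ih =>
    simp only [List.foldl_cons]
    rw [pvMach]
    by_cases hc : (h c).isSome
    · have htc : typed c = true := by rw [ht]; exact hc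
      rw [if_pos htc, if_pos hc]
      by_cases he : (some c == cur) = true
      · rw [if_pos he, if_pos he, ih]
      · rw [if_neg he, if_neg he, ih, List.append_assoc]
    · have htc : ¬ typed c = true := by rw [ht]; exact hc
      rw [if_neg htc, if_neg hc, ih]
      simp [List.append_assoc]

theorem pvMach_expand (h : Char → Option (Nat → String)) (cs : List Char) :
    (pvMach h cs none 0 = pvExpandL h cs) ∧
    (∀ c f n, h c = some f → 1 ≤ n →
      pvMach h cs (some c) n = f (n + pvRunLen c cs) :: pvExpandL h (cs.drop (pvRunLen c cs))) := by
  induction cs with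
  | nil =>
    constructor
    · simp [pvMach, pvFlushG, pvExpandL]
    · intro c f n hcf hn
      simp [pvMach, pvFlushG, pvRunLen, pvExpandL, hcf, Nat.pos_iff_ne_zero.mp hn]
  | cons d ds ih =>
    constructor
    · rw [pvMach]
      by_cases hd : (h d).isSome
      · obtain ⟨g, hg⟩ := Option.isSome_iff_exists.mp hd
        rw [if_pos hd]
        have : (some d == (none : Option Char)) = false := rfl
        rw [this]
        simp only [Bool.false_eq_true]
        rw [(ih.2) d g 1 hg (le_refl 1)]
        rw [pvExpandL, hg]
        simp [pvFlushG, Nat.add_comm]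
      · rw [if_neg hd]
        rw [ih.1, pvExpandL]
        have hnone : h d = none := Option.not_isSome_iff_eq_none.mp hd
        simp [pvFlushG, hnone]
    · intro c f n hcf hn
      rw [pvMach]
      have hflush : pvFlushG h (some c) n = [f n] := by
        simp [pvFlushG, hcf, Nat.pos_iff_ne_zero.mp hn]
      by_cases hd : (h d).isSome
      · rw [if_pos hd]
        by_cases hdc : d = c
        · subst hdc
          have : (some d == some d) = true := by simp
          rw [if_pos this]
          rw [(ih.2) d f (n+1) hcf (by omega)]
          have hrun : pvRunLen d (d :: ds) = pvRunLen d ds + 1 := by simp [pvRunLen]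
          rw [hrun]
          have : n + 1 + pvRunLen d ds = n + (pvRunLen d ds + 1) := by omega
          rw [this]
          rfl
        · obtain ⟨g, hg⟩ := Option.isSome_iff_exists.mp hd
          have : (some d == some c) = false := by simp [hdc]
          rw [this]
          simp only [Bool.false_eq_true]
          rw [hflush, (ih.2) d g 1 hg (le_refl 1)]
          have hrun : pvRunLen c (d :: ds) = 0 := by simp [pvRunLen, hdc]
          rw [hrun, List.drop_zero, pvExpandL, hg]
          simp [Nat.add_comm]
      · rw [if_neg hd]
        have hnone : h d = none := Option.not_isSome_iff_eq_none.mp hd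
        have hdc : d ≠ c := fun he => by rw [he, hcf] at hnone; simp at hnone
        rw [hflush, ih.1]
        have hrun : pvRunLen c (d :: ds) = 0 := by simp [pvRunLen, hdc]
        rw [hrun, List.drop_zero, pvExpandL, hnone]
        simp

theorem pvJoin_cons (s : String) (l : List String) :
    PySem.Str.join "" (s :: l) = s ++ PySem.Str.join "" l := by
  cases l with
  | nil => simp [PySem.Str.join, PySem.Chars.join, List.intercalate]
  | cons t l => simp [PySem.Str.join, PySem.Chars.join, List.intercalate]

-- pvReSub is the join of the pieces pvExpandL produces under the handler view
theorem pvReSub_eq_join (cls : Char → Bool) (repl : Char → Nat → String) (s : List Char) :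
    pvReSub cls repl s = PySem.Str.join "" (pvExpandL (pvHdl cls repl) s) := by
  induction hn : s.length using Nat.strong_induction_on generalizing s with
  | _ n ih =>
    cases s with
    | nil => simp [pvReSub, pvExpandL, PySem.Str.join, PySem.Chars.join, List.intercalate]
    | cons c cs =>
      rw [pvReSub, pvExpandL]
      by_cases hc : cls c = true
      · rw [if_pos hc]
        have : pvHdl cls repl c = some (repl c) := by simp [pvHdl, hc]
        rw [this]
        rw [ih ((cs.drop (pvRunLen c cs)).length) (by subst hn; simp only [List.length_drop, List.length_cons]; omega) _ rfl]
        rw [pvJoin_cons]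
      · rw [if_neg hc]
        have : pvHdl cls repl c = none := by simp [pvHdl, hc]
        rw [this]
        rw [ih (cs.length) (by subst hn; simp only [List.length_cons]; omega) _ rfl]
        rw [pvJoin_cons]

theorem pvPrefixB (xs : List Char) (c : Char) (hx : xs ≠ []) :
    (['B'].isPrefixOf (xs ++ [c])) = (['B'].isPrefixOf xs) := by
  cases xs with
  | nil => exact absurd rfl hx
  | cons a as => simp [List.isPrefixOf]

theorem pvGo_append (cs : List Char) (c : Char) :
    ∀ j, j < cs.length →
      PySem.Chars.rfind.go (cs ++ [c]) ['B'] j = PySem.Chars.rfind.go cs ['B'] j := by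
  intro j
  induction j with
  | zero =>
    intro hj
    simp only [PySem.Chars.rfind.go]
    rw [pvPrefixB cs c (by intro h; simp [h] at hj)]
  | succ j ihj =>
    intro hj
    simp only [PySem.Chars.rfind.go]
    rw [List.drop_append_of_le_length (by omega)]
    rw [pvPrefixB (cs.drop (j+1)) c (by
      intro h
      have := congrArg List.length h
      simp at this
      omega)]
    by_cases hp : ['B'].isPrefixOf (cs.drop (j+1))
    · simp [hp]
    · simp only [hp, Bool.false_eq_true]
      exact ihj (by omega)

theorem pvRfind_snoc (cs : List Char) (c : Char) :
    PySem.Chars.rfind (cs ++ [c]) ['B'] =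
      if c = 'B' then (cs.length : Int) else PySem.Chars.rfind cs ['B'] := by
  unfold PySem.Chars.rfind
  have hlen : (cs ++ [c]).length = cs.length + 1 := by simp
  rw [hlen]
  rw [show PySem.Chars.rfind.go (cs ++ [c]) ['B'] (cs.length + 1) =
      (if ['B'].isPrefixOf ((cs ++ [c]).drop (cs.length + 1)) then ((cs.length : Int) + 1)
       else PySem.Chars.rfind.go (cs ++ [c]) ['B'] cs.length) from by
    simp only [PySem.Chars.rfind.go]; norm_num]
  rw [show (cs ++ [c]).drop (cs.length + 1) = [] from by simp]
  rw [show (['B'].isPrefixOf ([] : List Char)) = false from rfl]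
  simp only [Bool.false_eq_true, if_false]
  cases hcs : cs.length with
  | zero =>
    have : cs = [] := List.length_eq_zero_iff.mp hcs
    subst this
    simp only [List.nil_append]
    simp only [PySem.Chars.rfind.go]
    by_cases hc : c = 'B'
    · subst hc; decide
    · have h1 : (['B'].isPrefixOf [c]) = false := by
        simp [List.isPrefixOf]
        intro h; exact hc h.symm
      simp [h1, hc]
  | succ m =>
    simp only [PySem.Chars.rfind.go]
    rw [show (cs ++ [c]).drop (m + 1) = [c] from by
      rw [List.drop_append_of_le_length (by omega), List.drop_of_length_le (by omega)]; simp]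
    rw [show cs.drop (m + 1) = [] from List.drop_of_length_le (by omega)]
    rw [show (['B'].isPrefixOf ([] : List Char)) = false from rfl]
    simp only [Bool.false_eq_true, if_false]
    by_cases hc : c = 'B'
    · subst hc
      rw [if_pos rfl, if_pos (by decide)]
    · rw [if_neg hc]
      have h1 : (['B'].isPrefixOf [c]) = false := by
        simp [List.isPrefixOf]
        intro h; exact hc h.symm
      rw [h1]
      simp only [Bool.false_eq_true, if_false]
      exact pvGo_append cs c m (by omega)

theorem pvAIdx_lt (cs : List Char) :
    ∀ m ∈ ((PySem.List.enumerate cs 0).filter (fun p => p.2 == 'B')).map (fun p => p.1),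
      m < (cs.length : Int) := by
  intro m hm
  simp only [List.mem_map, List.mem_filter] at hm
  obtain ⟨p, ⟨hp, _⟩, rfl⟩ := hm
  rw [PySem.List.mem_enumerate_iff] at hp
  obtain ⟨k, hk, rfl⟩ := hp
  simp
  omega

theorem pvMax_snoc (l : List Int) (x : Int) (hall : ∀ m ∈ l, m < x) :
    (PySem.List.max? (l ++ [x]) (fun y => y)).getD (-1) = x := by
  cases h : PySem.List.max? (l ++ [x]) (fun y => y) with
  | none =>
    rw [PySem.List.max?_eq_none_iff] at h
    exact absurd h (by simp)
  | some m =>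
    have hmem : m ∈ l ++ [x] := PySem.List.max?_mem h
    have hle : x ≤ m := PySem.List.max?_isMax h x (by simp)
    have hm : m = x := by
      rcases List.mem_append.mp hmem with hl | hx
      · exact absurd (hall m hl) (by omega)
      · simpa using hx
    simp [hm]

theorem pvA_snoc (cs : List Char) (c : Char) :
    ((PySem.List.max?
      (((PySem.List.enumerate (cs ++ [c]) 0).filter (fun p => p.2 == 'B')).map (fun p => p.1))
      (fun y => y)).getD (-1)) =
    if c = 'B' then (cs.length : Int)
    else ((PySem.List.max?
      (((PySem.List.enumerate cs 0).filter (fun p => p.2 == 'B')).map (fun p => p.1))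
      (fun y => y)).getD (-1)) := by
  rw [PySem.List.enumerate_append]
  rw [show PySem.List.enumerate [c] (0 + cs.length) = [((cs.length : Int), c)] from by
    rw [PySem.List.enumerate_cons, PySem.List.enumerate_nil]; norm_num]
  rw [List.filter_append]
  by_cases hc : c = 'B'
  · subst hc
    rw [if_pos rfl]
    rw [show List.filter (fun p => p.2 == 'B') [((cs.length : Int), 'B')] =
        [((cs.length : Int), 'B')] from by simp]
    rw [List.map_append]
    exact pvMax_snoc _ _ (pvAIdx_lt cs)
  · rw [if_neg hc]
    rw [show List.filter (fun p => p.2 == 'B') [((cs.length : Int), c)] = [] from by simp [hc]]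
    simp

theorem pvLastB_eq (cs : List Char) :
    ((PySem.List.max?
      (((PySem.List.enumerate cs 0).filter (fun p => p.2 == 'B')).map (fun p => p.1))
      (fun y => y)).getD (-1)) = PySem.Chars.rfind cs ['B'] := by
  induction cs using List.reverseRecOn with
  | nil => decide
  | append_singleton cs c ih =>
    rw [pvRfind_snoc, pvA_snoc, ih]

theorem pvFlushA_eq (pfx tl : String) (ss : Int) :
    pvFlushA pfx 0 tl ss =
      pvFlushG (pvHdl (fun c => c == 'P' || c == 'B' || c == 'T' || c == 'S') (pvReplFull pfx tl ss)) := by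
  funext o n
  cases o with
  | none => rfl
  | some c =>
    simp only [pvFlushA, pvFlushG, pvHdl]
    by_cases h0 : n = 0
    · simp [h0]
    by_cases hP : c = 'P'
    · simp [h0, hP, pvReplFull]
    by_cases hB : c = 'B'
    · simp [h0, hB, pvReplFull]
    by_cases hT : c = 'T'
    · simp [h0, hT, pvReplFull]
    by_cases hS : c = 'S'
    · simp [h0, hS, pvReplFull]
    simp [h0, hP, hB, hT, hS]

theorem pvFlushTail_eq (tl : String) (ss : Int) :
    pvFlushTail tl ss =
      pvFlushG (pvHdl (fun c => c == 'T' || c == 'S') (pvReplTail tl ss)) := by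
  funext o n
  cases o with
  | none => rfl
  | some c =>
    simp only [pvFlushTail, pvFlushG, pvHdl]
    by_cases h0 : n = 0
    · simp [h0]
    by_cases hT : c = 'T'
    · simp [h0, hT, pvReplTail]
    by_cases hS : c = 'S'
    · simp [h0, hS, pvReplTail]
    simp [h0, hT, hS]

theorem pvHdl_isSome (cls : Char → Bool) (repl : Char → Nat → String) (c : Char) :
    cls c = (pvHdl cls repl c).isSome := by
  unfold pvHdl
  by_cases h : cls c = true <;> simp [h]

-- ===== VERDICT (by name: the statement is the Claim_ definition above) =====
theorem assemble_sub_pn_py_spec : Claim_equal_assemble_sub_pn_py := by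
  intro setup base_pn_root type_letter sub_seq _
  unfold Spec_assemble_sub_pn_py
  simp only [assemble_sub_pn_py, assemble_sub_pn_py_alt]
  rw [show PySem.Str.rfind (PySem.Dict.getD (PySem.Dict.mk setup) "format" "") "B"
      = ((PySem.List.max?
          (((PySem.List.enumerate (PySem.Dict.getD (PySem.Dict.mk setup) "format" "").toList 0).filter
              (fun p => p.2 == 'B')).map (fun p => p.1))
          (fun y => y)).getD (-1)) from by
    rw [PySem.Str.rfind_eq, show ("B" : String).toList = ['B'] from rfl]
    exact (pvLastB_eq _).symm]
  split_ifs with hb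
  · -- last_b = -1 branch: assemble_pn on the whole format vs re.sub with the full pattern
    simp only [assemble_pn_port]
    refine (congrArg (PySem.Str.join "")
        (pvFold_eq_mach
          (pvHdl (fun c => c == 'P' || c == 'B' || c == 'T' || c == 'S')
            (pvReplFull (PySem.Dict.getD (PySem.Dict.mk setup) "prefix" "") type_letter sub_seq))
          (pvFlushA (PySem.Dict.getD (PySem.Dict.mk setup) "prefix" "") 0 type_letter sub_seq)
          (pvFlushA_eq _ _ _)
          (fun ch => ch == 'P' || ch == 'B' || ch == 'T' || ch == 'S')
          (fun c => pvHdl_isSome (fun ch => ch == 'P' || ch == 'B' || ch == 'T' || ch == 'S') _ c)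
          (PySem.Dict.getD (PySem.Dict.mk setup) "format" "").toList [] none 0)).trans ?_
    rw [List.nil_append, (pvMach_expand _ _).1, ← pvReSub_eq_join]
  · -- tail branch: the tail state machine vs re.sub with the T+|S+ pattern
    refine (congrArg (PySem.Str.join "")
        (pvFold_eq_mach
          (pvHdl (fun c => c == 'T' || c == 'S') (pvReplTail type_letter sub_seq))
          (pvFlushTail type_letter sub_seq)
          (pvFlushTail_eq _ _)
          (fun ch => ch == 'T' || ch == 'S')
          (fun c => pvHdl_isSome (fun ch => ch == 'T' || ch == 'S') _ c)
          (PySem.List.slice (PySem.Dict.getD (PySem.Dict.mk setup) "format" "").toList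
            (some (((PySem.List.max?
              (((PySem.List.enumerate (PySem.Dict.getD (PySem.Dict.mk setup) "format" "").toList 0).filter
                  (fun p => p.2 == 'B')).map (fun p => p.1))
              (fun y => y)).getD (-1)) + 1)) none)
          [base_pn_root] none 0)).trans ?_
    rw [(pvMach_expand _ _).1, List.singleton_append, pvJoin_cons, ← pvReSub_eq_join]
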